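-- pv_equiv track=rewrite | github.com/ChuQuocVu/Vietnamese-motorbike-license-plate-identification | Source_Code/detection.py | convert
-- ===== SOURCE A (Python) =====
-- def convert(candidates):
--     first_line = []
--     second_line = []
--
--     for candidate, coordinate in candidates:
--         if coordinate[0] < 100:
--             first_line.append((candidate, coordinate[1]))
--         elif coordinate[0] > 100:
--             second_line.append((candidate, coordinate[1]))
--
--     def take_second(s):
--         return s[1]
--
--     first_line = sorted(first_line, reverse=False, key=take_second)
--     second_line = sorted(second_line, reverse=False, key=take_second)
--
--     if len(second_line) == 0:
--         license_plate = "".join([str(ele[0]) for ele in first_line])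
--     else:
--         license_plate = "".join([str(ele[0]) for ele in first_line]) + "-" + "".join(
--             [str(ele[0]) for ele in second_line])
--
--     return license_plate, first_line
-- ===== SOURCE B (Python) =====
-- def convert(candidates):
--     # single pass, online ordered insertion (insertion sort), no sorted() call
--     first_line = []
--     second_line = []
--     for candidate, (x, y) in candidates:
--         if x == 100:
--             continue
--         target = first_line if x < 100 else second_line
--         i = 0
--         while i < len(target) and target[i][1] <= y:
--             i += 1
--         target.insert(i, (candidate, y))
--     plate = "".join(c for c, _ in first_line)
--     if second_line:
--         plate = plate + "-" + "".join(c for c, _ in second_line)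
--     return plate, first_line
-- ===== Notes on version B (the rewrite author's own statement) =====
-- stated objective: alternative
-- what changed: Replaces partition-then-two-library-sorts with a single online pass that inserts each kept candidate into its y-ordered position in the appropriate line (hand-written stable insertion sort, no sorted() call).
import Mathlib
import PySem

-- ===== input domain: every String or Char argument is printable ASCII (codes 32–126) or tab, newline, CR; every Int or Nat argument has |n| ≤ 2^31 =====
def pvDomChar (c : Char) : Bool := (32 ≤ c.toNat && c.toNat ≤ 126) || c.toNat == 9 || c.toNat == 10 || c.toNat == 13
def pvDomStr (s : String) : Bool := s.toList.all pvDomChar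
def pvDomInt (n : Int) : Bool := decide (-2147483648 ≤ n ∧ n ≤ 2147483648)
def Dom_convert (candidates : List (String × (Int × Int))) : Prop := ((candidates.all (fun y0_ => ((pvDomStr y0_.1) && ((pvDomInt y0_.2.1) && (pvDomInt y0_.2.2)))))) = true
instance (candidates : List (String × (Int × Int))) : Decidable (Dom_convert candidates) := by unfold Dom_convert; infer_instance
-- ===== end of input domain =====

-- B replaces partition-then-two-library-sorts by one online pass that inserts each
-- kept candidate into its y-ordered place in the proper line (hand insertion sort),
-- objective: alternative.

-- ===== PORT A =====
def convert (candidates : List (String × (Int × Int))) : String × (List (String × Int)) :=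
  -- the for-loop filling first_line / second_line
  let st := candidates.foldl
    (fun (st : List (String × Int) × List (String × Int)) c =>
      if c.2.1 < 100 then (st.1 ++ [(c.1, c.2.2)], st.2)
      else if c.2.1 > 100 then (st.1, st.2 ++ [(c.1, c.2.2)])
      else st) ([], [])
  let first_line := PySem.List.sorted st.1 (fun e => e.2)
  let second_line := PySem.List.sorted st.2 (fun e => e.2)
  let license_plate :=
    if second_line.length = 0 then PySem.Str.join "" (first_line.map (fun e => e.1))
    else PySem.Str.join "" (first_line.map (fun e => e.1)) ++ "-" ++
         PySem.Str.join "" (second_line.map (fun e => e.1))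
  (license_plate, first_line)

-- ===== PORT B =====
-- the while-loop + insert of Source B: skip while head y ≤ new y, then insert
def insY (e : String × Int) : List (String × Int) → List (String × Int)
  | [] => [e]
  | h :: t => if h.2 ≤ e.2 then h :: insY e t else e :: h :: t

def convert_alt (candidates : List (String × (Int × Int))) : String × (List (String × Int)) :=
  let st := candidates.foldl
    (fun (st : List (String × Int) × List (String × Int)) c =>
      if c.2.1 = 100 then st
      else if c.2.1 < 100 then (insY (c.1, c.2.2) st.1, st.2)
      else (st.1, insY (c.1, c.2.2) st.2)) ([], [])
  let plate := PySem.Str.join "" (st.1.map (fun e => e.1))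
  if st.2 ≠ [] then
    (plate ++ "-" ++ PySem.Str.join "" (st.2.map (fun e => e.1)), st.1)
  else (plate, st.1)

-- ===== PRECONDITION & SPEC =====
def Spec_convert (candidates : List (String × (Int × Int))) (out : String × (List (String × Int))) : Prop := out = convert_alt candidates
instance (candidates : List (String × (Int × Int))) (out : String × (List (String × Int))) : Decidable (Spec_convert candidates out) := by unfold Spec_convert; infer_instance

-- ===== CLAIM =====
def Claim_equal_convert : Prop := ∀ (candidates : List (String × (Int × Int))), Dom_convert candidates → Spec_convert candidates (convert candidates)

-- ===== LEMMAS AND PROOFS =====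

-- A's for-loop is append-of-filtered-map on each component
theorem pv_loop_eq (l : List (String × (Int × Int))) (a b : List (String × Int)) :
    l.foldl (fun (st : List (String × Int) × List (String × Int)) c =>
      if c.2.1 < 100 then (st.1 ++ [(c.1, c.2.2)], st.2)
      else if c.2.1 > 100 then (st.1, st.2 ++ [(c.1, c.2.2)])
      else st) (a, b)
    = (a ++ (l.filter (fun c => decide (c.2.1 < 100))).map (fun c => (c.1, c.2.2)),
       b ++ (l.filter (fun c => decide (c.2.1 > 100))).map (fun c => (c.1, c.2.2))) := by
  induction l generalizing a b with
  | nil => simp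
  | cons x xs ih =>
    by_cases h1 : x.2.1 < 100
    · have h2 : ¬ x.2.1 > 100 := by omega
      simp [h1, h2, ih]
    · by_cases h2 : x.2.1 > 100
      · simp [h1, h2, ih]
      · simp [h1, h2, ih]

-- B's hand insertion equals the stable-sort insertion step
theorem pv_insY_eq (e : String × Int) (l : List (String × Int)) :
    insY e l = PySem.List.insertBy (fun a b => decide (a.2 < b.2)) e l := by
  induction l with
  | nil => simp [insY, PySem.List.insertBy]
  | cons h t ih =>
    by_cases hb : h.2 ≤ e.2
    · have : ¬ e.2 < h.2 := by omega
      simp [insY, PySem.List.insertBy, hb, this, ih]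
    · have : e.2 < h.2 := by omega
      simp [insY, PySem.List.insertBy, hb, this]

-- B's single pass computes, on each component, the insertion fold over the filtered projection
theorem pv_bloop_eq (l : List (String × (Int × Int))) (a b : List (String × Int)) :
    l.foldl (fun (st : List (String × Int) × List (String × Int)) c =>
      if c.2.1 = 100 then st
      else if c.2.1 < 100 then (insY (c.1, c.2.2) st.1, st.2)
      else (st.1, insY (c.1, c.2.2) st.2)) (a, b)
    = (((l.filter (fun c => decide (c.2.1 < 100))).map (fun c => (c.1, c.2.2))).foldl
         (fun acc x => insY x acc) a,
       ((l.filter (fun c => decide (c.2.1 > 100))).map (fun c => (c.1, c.2.2))).foldl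
         (fun acc x => insY x acc) b) := by
  induction l generalizing a b with
  | nil => simp
  | cons x xs ih =>
    by_cases h0 : x.2.1 = 100
    · have h1 : ¬ x.2.1 < 100 := by omega
      have h2 : ¬ x.2.1 > 100 := by omega
      simp [h0, ih]
    · by_cases h1 : x.2.1 < 100
      · have h2 : ¬ x.2.1 > 100 := by omega
        simp [h0, h1, h2, ih]
      · have h2 : x.2.1 > 100 := by omega
        simp [h0, h1, h2, ih]

-- the insertion fold is the stable sort by y
theorem pv_insfold_eq_sorted (xs : List (String × Int)) :
    xs.foldl (fun acc x => insY x acc) [] = PySem.List.sorted xs (fun e => e.2) := by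
  rw [PySem.List.sorted_eq_foldl_insertBy]
  induction xs using List.reverseRecOn with
  | nil => rfl
  | append_singleton t x ih => simp [List.foldl_append, pv_insY_eq]

-- ===== VERDICT =====
theorem convert_spec : Claim_equal_convert := by
  intro candidates _
  unfold Spec_convert convert convert_alt
  rw [pv_loop_eq, pv_bloop_eq]
  simp only [List.nil_append, pv_insfold_eq_sorted]
  cases h : PySem.List.sorted ((candidates.filter (fun c => decide (c.2.1 > 100))).map
      (fun c => (c.1, c.2.2))) (fun e => e.2) with
  | nil => simp
  | cons y t => simp
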